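-- pv_equiv track=rewrite | github.com/ashh44/-HackerRank-Filling-in-Data | Maximum path sum in a pyramid.py | construct_pyramid
-- ===== SOURCE A (Python) =====
-- def construct_pyramid(a):
--     pyramid = []
--     index = 0
--     row_length = 1
--
--     while index < len(a):
--         pyramid.append(a[index:index + row_length])
--         index += row_length
--         row_length += 1
--
--     return pyramid
-- ===== SOURCE B (Python) =====
-- def construct_pyramid(a):
--     def rows(rest, k):
--         if not rest:
--             return []
--         return [rest[:k]] + rows(rest[k:], k + 1)
--     return rows(a, 1)
-- ===== Notes on version B (the rewrite author's own statement) =====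
-- stated objective: simpler
-- what changed: Replaced the while-loop with index/row_length accumulators and an output list mutated by append by a structural recursion that consumes successive suffixes of the list, taking one more element per row and building the result front-to-back.
import Mathlib
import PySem

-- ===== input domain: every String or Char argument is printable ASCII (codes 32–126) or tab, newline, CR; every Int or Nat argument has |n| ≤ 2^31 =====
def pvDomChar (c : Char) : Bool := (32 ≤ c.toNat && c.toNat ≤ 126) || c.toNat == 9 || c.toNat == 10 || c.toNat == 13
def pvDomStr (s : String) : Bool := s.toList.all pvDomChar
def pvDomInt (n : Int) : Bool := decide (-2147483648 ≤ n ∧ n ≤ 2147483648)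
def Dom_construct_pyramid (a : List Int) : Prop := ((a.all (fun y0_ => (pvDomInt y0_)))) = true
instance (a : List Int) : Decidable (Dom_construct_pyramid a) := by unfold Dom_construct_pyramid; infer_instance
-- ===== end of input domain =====

-- B replaces A's while-loop with index/row_length accumulators by a structural recursion
-- consuming successive suffixes, taking one more element per row (objective: simpler).

-- ===== PORT A =====
-- A's while-loop; the loop state row_length (always ≥ 1) is encoded as k+1 so the
-- measure a.length - index decreases.
def pyLoopA (a : List Int) (pyramid : List (List Int)) (index k : Nat) : List (List Int) :=
  if _h : index < a.length then
    pyLoopA a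
      (pyramid ++ [PySem.List.slice a (some (index : Int)) (some ((index : Int) + ((k : Int) + 1)))])
      (index + (k + 1)) (k + 1)
  else pyramid
termination_by a.length - index
decreasing_by omega

def construct_pyramid (a : List Int) : List (List Int) := pyLoopA a [] 0 0

-- ===== PORT B =====
-- B's recursion rows(rest, k): the argument k (always ≥ 1) is encoded as j+1.
def pyRowsB (rest : List Int) (j : Nat) : List (List Int) :=
  if h : rest = [] then []
  else rest.take (j + 1) :: pyRowsB (rest.drop (j + 1)) (j + 1)
termination_by rest.length
decreasing_by
  have : 0 < rest.length := List.length_pos_iff.mpr h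
  simp
  omega

def construct_pyramid_alt (a : List Int) : List (List Int) := pyRowsB a 0

-- ===== PRECONDITION & SPEC =====
def Spec_construct_pyramid (a : List Int) (out : List (List Int)) : Prop := out = construct_pyramid_alt a
instance (a : List Int) (out : List (List Int)) : Decidable (Spec_construct_pyramid a out) := by unfold Spec_construct_pyramid; infer_instance

-- ===== CLAIM (what is proved, stated in full; the proofs are below) =====
def Claim_equal_construct_pyramid : Prop := ∀ (a : List Int), Dom_construct_pyramid a → Spec_construct_pyramid a (construct_pyramid a)

-- ===== LEMMAS AND PROOFS =====
theorem pyLoopA_eq_rowsB (a : List Int) :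
    ∀ n index k pyramid, a.length - index ≤ n →
      pyLoopA a pyramid index k = pyramid ++ pyRowsB (a.drop index) k := by
  intro n
  induction n with
  | zero =>
    intro index k pyramid hn
    rw [pyLoopA, pyRowsB]
    have hle : a.length ≤ index := by omega
    simp [Nat.not_lt.mpr hle, List.drop_eq_nil_of_le hle]
  | succ m ih =>
    intro index k pyramid hn
    rw [pyLoopA]
    by_cases h : index < a.length
    · simp only [h, dif_pos]
      rw [ih (index + (k + 1)) (k + 1) _ (by omega)]
      have hdropne : a.drop index ≠ [] := by
        simp [List.drop_eq_nil_iff]; omega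
      conv_rhs => rw [pyRowsB]
      simp only [hdropne, dif_neg, not_false_iff]
      have hslice : PySem.List.slice a (some (index : Int))
          (some ((index : Int) + ((k : Int) + 1))) = (a.drop index).take (k + 1) := by
        have := PySem.List.slice_natCast_add a index (k + 1)
        rw [← this]; push_cast; ring_nf
      rw [hslice, List.drop_drop, List.append_assoc]
      simp
    · simp only [h, dif_neg, not_false_iff]
      have hle : a.length ≤ index := by omega
      rw [pyRowsB]
      simp [List.drop_eq_nil_of_le hle]

-- ===== VERDICT (by name: the statement is the Claim_ definition above) =====
theorem construct_pyramid_spec : Claim_equal_construct_pyramid := by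
  intro a _
  unfold Spec_construct_pyramid construct_pyramid construct_pyramid_alt
  simpa using pyLoopA_eq_rowsB a a.length 0 0 [] (by omega)
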